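-- pv_equiv track=rewrite | github.com/kantrarian/geospec | monitoring/src/test_ntrip_connection.py | parse_sourcetable
-- ===== SOURCE A (Python) =====
-- def parse_sourcetable(sourcetable: str) -> dict:
--     """Parse NTRIP sourcetable into structured data."""
--     result = {
--         'casters': [],
--         'networks': [],
--         'streams': []
--     }
--
--     for line in sourcetable.split('\n'):
--         line = line.strip()
--         if line.startswith('CAS;'):
--             # Caster info
--             parts = line.split(';')
--             if len(parts) >= 3:
--                 result['casters'].append({
--                     'host': parts[1],
--                     'port': parts[2] if len(parts) > 2 else '',
--                     'identifier': parts[3] if len(parts) > 3 else ''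
--                 })
--         elif line.startswith('NET;'):
--             # Network info
--             parts = line.split(';')
--             if len(parts) >= 2:
--                 result['networks'].append({
--                     'name': parts[1],
--                     'operator': parts[3] if len(parts) > 3 else ''
--                 })
--         elif line.startswith('STR;'):
--             # Stream (mountpoint) info
--             parts = line.split(';')
--             if len(parts) >= 10:
--                 result['streams'].append({
--                     'mountpoint': parts[1],
--                     'identifier': parts[2],
--                     'format': parts[3],
--                     'format_details': parts[4],
--                     'carrier': parts[5],
--                     'nav_system': parts[6],
--                     'network': parts[7],
--                     'country': parts[8],
--                     'latitude': parts[9],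
--                     'longitude': parts[10] if len(parts) > 10 else '',
--                     'nmea': parts[11] if len(parts) > 11 else '',
--                     'solution': parts[12] if len(parts) > 12 else '',
--                 })
--
--     return result
-- ===== SOURCE B (Python) =====
-- def _padded_parts(lines, prefix, min_parts):
--     """Yield the ';'-split fields of each matching line, padded with '' to 13 fields."""
--     for ln in lines:
--         if ln.startswith(prefix):
--             p = ln.split(';')
--             if len(p) >= min_parts:
--                 yield p + [''] * (13 - len(p))
--
--
-- def parse_sourcetable(sourcetable: str) -> dict:
--     """Parse NTRIP sourcetable into structured data (three staged filtered passes)."""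
--     lines = [ln.strip() for ln in sourcetable.split('\n')]
--     return {
--         'casters': [{'host': p[1], 'port': p[2], 'identifier': p[3]}
--                     for p in _padded_parts(lines, 'CAS;', 3)],
--         'networks': [{'name': p[1], 'operator': p[3]}
--                      for p in _padded_parts(lines, 'NET;', 2)],
--         'streams': [{'mountpoint': p[1], 'identifier': p[2], 'format': p[3],
--                      'format_details': p[4], 'carrier': p[5], 'nav_system': p[6],
--                      'network': p[7], 'country': p[8], 'latitude': p[9],
--                      'longitude': p[10], 'nmea': p[11], 'solution': p[12]}
--                     for p in _padded_parts(lines, 'STR;', 10)],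
--     }
-- ===== Notes on version B (the rewrite author's own statement) =====
-- stated objective: alternative
-- what changed: A makes one pass over the lines mutating a result dict via three prefix branches with per-field length guards; B instead strips all lines once, then makes three independent staged passes (one per record type) that filter/split/pad each matching line to 13 fields and build each record list by comprehension, assembling the result dict at the end with no mutation and no per-field guards.
import Mathlib
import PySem

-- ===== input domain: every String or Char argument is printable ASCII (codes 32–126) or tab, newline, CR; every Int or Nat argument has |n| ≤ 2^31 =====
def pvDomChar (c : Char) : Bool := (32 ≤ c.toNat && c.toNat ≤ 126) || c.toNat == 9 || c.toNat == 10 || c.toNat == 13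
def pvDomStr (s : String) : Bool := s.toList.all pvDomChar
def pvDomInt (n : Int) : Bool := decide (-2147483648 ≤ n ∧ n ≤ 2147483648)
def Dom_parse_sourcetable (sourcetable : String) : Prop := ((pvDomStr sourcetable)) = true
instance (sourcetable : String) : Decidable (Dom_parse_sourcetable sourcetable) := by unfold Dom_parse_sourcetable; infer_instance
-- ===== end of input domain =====

-- B replaces A's single mutating pass with three prefix branches by three independent
-- staged passes (one per record type) over the stripped lines, padding each split line
-- to 13 fields instead of guarding each index (objective: alternative; same cost).

-- The state of A's loop is the Python result dict: Dict String (List record).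
def pvState : Type := PySem.Dict String (List (List (String × String)))

def pvInit : pvState := PySem.Dict.mk [("casters", []), ("networks", []), ("streams", [])]

-- ===== PORT A =====
-- A's CAS branch body ('parts' = line.split(';') of the already-matched line)
def pvCasA (result : pvState) (parts : List String) : pvState :=
  if parts.length ≥ 3 then
    PySem.Dict.modify result "casters" [] (· ++ [[("host", parts.getD 1 ""),
      ("port", if parts.length > 2 then parts.getD 2 "" else ""),
      ("identifier", if parts.length > 3 then parts.getD 3 "" else "")]])
  else result

-- A's NET branch body
def pvNetA (result : pvState) (parts : List String) : pvState :=
  if parts.length ≥ 2 then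
    PySem.Dict.modify result "networks" [] (· ++ [[("name", parts.getD 1 ""),
      ("operator", if parts.length > 3 then parts.getD 3 "" else "")]])
  else result

-- A's STR branch body
def pvStrA (result : pvState) (parts : List String) : pvState :=
  if parts.length ≥ 10 then
    PySem.Dict.modify result "streams" [] (· ++ [[("mountpoint", parts.getD 1 ""),
      ("identifier", parts.getD 2 ""), ("format", parts.getD 3 ""),
      ("format_details", parts.getD 4 ""), ("carrier", parts.getD 5 ""),
      ("nav_system", parts.getD 6 ""), ("network", parts.getD 7 ""),
      ("country", parts.getD 8 ""), ("latitude", parts.getD 9 ""),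
      ("longitude", if parts.length > 10 then parts.getD 10 "" else ""),
      ("nmea", if parts.length > 11 then parts.getD 11 "" else ""),
      ("solution", if parts.length > 12 then parts.getD 12 "" else "")]])
  else result

-- one iteration of A's for-loop: strip the line, then the three prefix branches
def pvStepA (result : pvState) (rawline : String) : pvState :=
  if PySem.Str.startswith (PySem.Str.strip rawline) "CAS;" then
    pvCasA result ((PySem.Str.split? (PySem.Str.strip rawline) ";").getD [])
  else if PySem.Str.startswith (PySem.Str.strip rawline) "NET;" then
    pvNetA result ((PySem.Str.split? (PySem.Str.strip rawline) ";").getD [])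
  else if PySem.Str.startswith (PySem.Str.strip rawline) "STR;" then
    pvStrA result ((PySem.Str.split? (PySem.Str.strip rawline) ";").getD [])
  else result

def parse_sourcetable (sourcetable : String) : List (String × List (List (String × String))) :=
  (((PySem.Str.split? sourcetable "\n").getD []).foldl pvStepA pvInit).items

-- ===== PORT B =====
-- B pads the split fields with '' to 13 entries: p + [''] * (13 - len(p))
def pvPad (p : List String) : List String := p ++ List.replicate (13 - p.length) ""

-- B's generator _padded_parts: the padded fields of each line matching the prefix
def pvPaddedParts (lines : List String) (pre : String) (minParts : Nat) : List (List String) :=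
  lines.filterMap (fun ln =>
    if PySem.Str.startswith ln pre then
      (fun p => if p.length ≥ minParts then some (pvPad p) else none)
        ((PySem.Str.split? ln ";").getD [])
    else none)

def pvCasRec (p : List String) : List (String × String) :=
  [("host", p.getD 1 ""), ("port", p.getD 2 ""), ("identifier", p.getD 3 "")]

def pvNetRec (p : List String) : List (String × String) :=
  [("name", p.getD 1 ""), ("operator", p.getD 3 "")]

def pvStrRec (p : List String) : List (String × String) :=
  [("mountpoint", p.getD 1 ""), ("identifier", p.getD 2 ""), ("format", p.getD 3 ""),
   ("format_details", p.getD 4 ""), ("carrier", p.getD 5 ""), ("nav_system", p.getD 6 ""),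
   ("network", p.getD 7 ""), ("country", p.getD 8 ""), ("latitude", p.getD 9 ""),
   ("longitude", p.getD 10 ""), ("nmea", p.getD 11 ""), ("solution", p.getD 12 "")]

def parse_sourcetable_alt (sourcetable : String) : List (String × List (List (String × String))) :=
  let lines := ((PySem.Str.split? sourcetable "\n").getD []).map PySem.Str.strip
  [("casters", (pvPaddedParts lines "CAS;" 3).map pvCasRec),
   ("networks", (pvPaddedParts lines "NET;" 2).map pvNetRec),
   ("streams", (pvPaddedParts lines "STR;" 10).map pvStrRec)]

-- ===== PRECONDITION & SPEC =====
def Spec_parse_sourcetable (sourcetable : String) (out : List (String × List (List (String × String)))) : Prop := out = parse_sourcetable_alt sourcetable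
instance (sourcetable : String) (out : List (String × List (List (String × String)))) : Decidable (Spec_parse_sourcetable sourcetable out) := by unfold Spec_parse_sourcetable; infer_instance

-- ===== CLAIM =====
def Claim_equal_parse_sourcetable : Prop := ∀ (sourcetable : String), Dom_parse_sourcetable sourcetable → Spec_parse_sourcetable sourcetable (parse_sourcetable sourcetable)

-- ===== LEMMAS AND PROOFS =====
-- two nonempty prefixes with different first characters cannot both prefix the same string
theorem pvStartswith_disjoint (s : String) (c1 c2 : Char) (p1 p2 : List Char) (hne : c1 ≠ c2)
    (h : PySem.Chars.startswith s.toList (c1 :: p1) = true) :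
    PySem.Chars.startswith s.toList (c2 :: p2) = false := by
  by_contra hb
  rw [Bool.not_eq_false] at hb
  obtain ⟨t, ht⟩ := (PySem.Chars.startswith_iff _ _).1 h
  obtain ⟨u, hu⟩ := (PySem.Chars.startswith_iff _ _).1 hb
  rw [← hu] at ht
  exact hne (by injection ht)

theorem pvPad_getD (p : List String) (i : Nat) (_hi : i < 13) :
    (pvPad p).getD i "" = if i < p.length then p.getD i "" else "" := by
  by_cases h : i < p.length
  · simp [pvPad, List.getD, List.getElem?_append_left h, h]
  · simp only [h, if_false]
    simp only [pvPad, List.getD, List.getElem?_append_right (by omega : p.length ≤ i),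
      List.getElem?_replicate]
    split <;> rfl

-- the three records agree under the length guard
theorem pvCasRec_eq (parts : List String) (hl : parts.length ≥ 3) :
    [(("host" : String), parts.getD 1 ""),
     ("port", if parts.length > 2 then parts.getD 2 "" else ""),
     ("identifier", if parts.length > 3 then parts.getD 3 "" else "")]
    = pvCasRec (pvPad parts) := by
  simp only [pvCasRec, pvPad_getD parts 1 (by omega), pvPad_getD parts 2 (by omega),
    pvPad_getD parts 3 (by omega), if_pos (show 1 < parts.length by omega),
    if_pos (show 2 < parts.length by omega)]

theorem pvNetRec_eq (parts : List String) (hl : parts.length ≥ 2) :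
    [(("name" : String), parts.getD 1 ""),
     ("operator", if parts.length > 3 then parts.getD 3 "" else "")]
    = pvNetRec (pvPad parts) := by
  simp only [pvNetRec, pvPad_getD parts 1 (by omega), pvPad_getD parts 3 (by omega),
    if_pos (show 1 < parts.length by omega)]

theorem pvStrRec_eq (parts : List String) (hl : parts.length ≥ 10) :
    [(("mountpoint" : String), parts.getD 1 ""), ("identifier", parts.getD 2 ""),
     ("format", parts.getD 3 ""), ("format_details", parts.getD 4 ""),
     ("carrier", parts.getD 5 ""), ("nav_system", parts.getD 6 ""),
     ("network", parts.getD 7 ""), ("country", parts.getD 8 ""),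
     ("latitude", parts.getD 9 ""),
     ("longitude", if parts.length > 10 then parts.getD 10 "" else ""),
     ("nmea", if parts.length > 11 then parts.getD 11 "" else ""),
     ("solution", if parts.length > 12 then parts.getD 12 "" else "")]
    = pvStrRec (pvPad parts) := by
  simp only [pvStrRec, pvPad_getD parts 1 (by omega), pvPad_getD parts 2 (by omega),
    pvPad_getD parts 3 (by omega), pvPad_getD parts 4 (by omega),
    pvPad_getD parts 5 (by omega), pvPad_getD parts 6 (by omega),
    pvPad_getD parts 7 (by omega), pvPad_getD parts 8 (by omega),
    pvPad_getD parts 9 (by omega), pvPad_getD parts 10 (by omega),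
    pvPad_getD parts 11 (by omega), pvPad_getD parts 12 (by omega),
    if_pos (show 1 < parts.length by omega), if_pos (show 2 < parts.length by omega),
    if_pos (show 3 < parts.length by omega), if_pos (show 4 < parts.length by omega),
    if_pos (show 5 < parts.length by omega), if_pos (show 6 < parts.length by omega),
    if_pos (show 7 < parts.length by omega), if_pos (show 8 < parts.length by omega),
    if_pos (show 9 < parts.length by omega)]

-- cons-step lemmas for B's staged pass
theorem pvPaddedParts_pos (ln : String) (ls : List String) (pre : String) (m : Nat)
    (h : PySem.Str.startswith ln pre = true)
    (hl : ((PySem.Str.split? ln ";").getD []).length ≥ m) :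
    pvPaddedParts (ln :: ls) pre m
      = pvPad ((PySem.Str.split? ln ";").getD []) :: pvPaddedParts ls pre m := by
  rw [PySem.Str.startswith_eq] at h
  simp [pvPaddedParts, h, hl]

theorem pvPaddedParts_short (ln : String) (ls : List String) (pre : String) (m : Nat)
    (h : PySem.Str.startswith ln pre = true)
    (hl : ¬ ((PySem.Str.split? ln ";").getD []).length ≥ m) :
    pvPaddedParts (ln :: ls) pre m = pvPaddedParts ls pre m := by
  rw [PySem.Str.startswith_eq] at h
  simp [pvPaddedParts, h, hl]

theorem pvPaddedParts_neg (ln : String) (ls : List String) (pre : String) (m : Nat)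
    (h : PySem.Str.startswith ln pre = false) :
    pvPaddedParts (ln :: ls) pre m = pvPaddedParts ls pre m := by
  rw [PySem.Str.startswith_eq] at h
  simp [pvPaddedParts, h]

-- prefix exclusivity for the three tags
theorem pvExclCN (s : String) (h : PySem.Str.startswith s "CAS;" = true) :
    PySem.Str.startswith s "NET;" = false := by
  rw [PySem.Str.startswith_eq] at h ⊢
  exact pvStartswith_disjoint s 'C' 'N' "AS;".toList "ET;".toList (by decide) h

theorem pvExclCS (s : String) (h : PySem.Str.startswith s "CAS;" = true) :
    PySem.Str.startswith s "STR;" = false := by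
  rw [PySem.Str.startswith_eq] at h ⊢
  exact pvStartswith_disjoint s 'C' 'S' "AS;".toList "TR;".toList (by decide) h

theorem pvExclNC (s : String) (h : PySem.Str.startswith s "NET;" = true) :
    PySem.Str.startswith s "CAS;" = false := by
  rw [PySem.Str.startswith_eq] at h ⊢
  exact pvStartswith_disjoint s 'N' 'C' "ET;".toList "AS;".toList (by decide) h

theorem pvExclNS (s : String) (h : PySem.Str.startswith s "NET;" = true) :
    PySem.Str.startswith s "STR;" = false := by
  rw [PySem.Str.startswith_eq] at h ⊢
  exact pvStartswith_disjoint s 'N' 'S' "ET;".toList "TR;".toList (by decide) h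

theorem pvExclSC (s : String) (h : PySem.Str.startswith s "STR;" = true) :
    PySem.Str.startswith s "CAS;" = false := by
  rw [PySem.Str.startswith_eq] at h ⊢
  exact pvStartswith_disjoint s 'S' 'C' "TR;".toList "AS;".toList (by decide) h

theorem pvExclSN (s : String) (h : PySem.Str.startswith s "STR;" = true) :
    PySem.Str.startswith s "NET;" = false := by
  rw [PySem.Str.startswith_eq] at h ⊢
  exact pvStartswith_disjoint s 'S' 'N' "TR;".toList "ET;".toList (by decide) h

-- computing A's Dict.modify on the concrete three-key state
theorem pvModifyCas (c n s : List (List (String × String)))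
    (f : List (List (String × String)) → List (List (String × String))) :
    PySem.Dict.modify (PySem.Dict.mk [("casters", c), ("networks", n), ("streams", s)]) "casters" [] f
      = PySem.Dict.mk [("casters", f c), ("networks", n), ("streams", s)] := by
  simp [PySem.Dict.modify, PySem.Dict.insert, PySem.Dict.getD, PySem.Dict.get?, PySem.Dict.contains]

theorem pvModifyNet (c n s : List (List (String × String)))
    (f : List (List (String × String)) → List (List (String × String))) :
    PySem.Dict.modify (PySem.Dict.mk [("casters", c), ("networks", n), ("streams", s)]) "networks" [] f
      = PySem.Dict.mk [("casters", c), ("networks", f n), ("streams", s)] := by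
  simp [PySem.Dict.modify, PySem.Dict.insert, PySem.Dict.getD, PySem.Dict.get?, PySem.Dict.contains]

theorem pvModifyStr (c n s : List (List (String × String)))
    (f : List (List (String × String)) → List (List (String × String))) :
    PySem.Dict.modify (PySem.Dict.mk [("casters", c), ("networks", n), ("streams", s)]) "streams" [] f
      = PySem.Dict.mk [("casters", c), ("networks", n), ("streams", f s)] := by
  simp [PySem.Dict.modify, PySem.Dict.insert, PySem.Dict.getD, PySem.Dict.get?, PySem.Dict.contains]

-- computing one step of A's loop on the concrete three-key state
theorem pvStep_cas (c n s : List (List (String × String))) (raw : String)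
    (hc : PySem.Str.startswith (PySem.Str.strip raw) "CAS;" = true)
    (hl : ((PySem.Str.split? (PySem.Str.strip raw) ";").getD []).length ≥ 3) :
    pvStepA (PySem.Dict.mk [("casters", c), ("networks", n), ("streams", s)]) raw
      = PySem.Dict.mk [("casters", c ++ [pvCasRec (pvPad ((PySem.Str.split? (PySem.Str.strip raw) ";").getD []))]),
          ("networks", n), ("streams", s)] := by
  unfold pvStepA pvCasA
  rw [if_pos hc, if_pos hl, pvModifyCas, pvCasRec_eq _ hl]

theorem pvStep_cas_short (d : pvState) (raw : String)
    (hc : PySem.Str.startswith (PySem.Str.strip raw) "CAS;" = true)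
    (hl : ¬ ((PySem.Str.split? (PySem.Str.strip raw) ";").getD []).length ≥ 3) :
    pvStepA d raw = d := by
  unfold pvStepA pvCasA
  rw [if_pos hc, if_neg hl]

theorem pvStep_net (c n s : List (List (String × String))) (raw : String)
    (hc : ¬ PySem.Str.startswith (PySem.Str.strip raw) "CAS;" = true)
    (hn : PySem.Str.startswith (PySem.Str.strip raw) "NET;" = true)
    (hl : ((PySem.Str.split? (PySem.Str.strip raw) ";").getD []).length ≥ 2) :
    pvStepA (PySem.Dict.mk [("casters", c), ("networks", n), ("streams", s)]) raw
      = PySem.Dict.mk [("casters", c),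
          ("networks", n ++ [pvNetRec (pvPad ((PySem.Str.split? (PySem.Str.strip raw) ";").getD []))]),
          ("streams", s)] := by
  unfold pvStepA pvNetA
  rw [if_neg hc, if_pos hn, if_pos hl, pvModifyNet, pvNetRec_eq _ hl]

theorem pvStep_net_short (d : pvState) (raw : String)
    (hc : ¬ PySem.Str.startswith (PySem.Str.strip raw) "CAS;" = true)
    (hn : PySem.Str.startswith (PySem.Str.strip raw) "NET;" = true)
    (hl : ¬ ((PySem.Str.split? (PySem.Str.strip raw) ";").getD []).length ≥ 2) :
    pvStepA d raw = d := by
  unfold pvStepA pvNetA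
  rw [if_neg hc, if_pos hn, if_neg hl]

theorem pvStep_str (c n s : List (List (String × String))) (raw : String)
    (hc : ¬ PySem.Str.startswith (PySem.Str.strip raw) "CAS;" = true)
    (hn : ¬ PySem.Str.startswith (PySem.Str.strip raw) "NET;" = true)
    (hs : PySem.Str.startswith (PySem.Str.strip raw) "STR;" = true)
    (hl : ((PySem.Str.split? (PySem.Str.strip raw) ";").getD []).length ≥ 10) :
    pvStepA (PySem.Dict.mk [("casters", c), ("networks", n), ("streams", s)]) raw
      = PySem.Dict.mk [("casters", c), ("networks", n),
          ("streams", s ++ [pvStrRec (pvPad ((PySem.Str.split? (PySem.Str.strip raw) ";").getD []))])] := by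
  unfold pvStepA pvStrA
  rw [if_neg hc, if_neg hn, if_pos hs, if_pos hl, pvModifyStr, pvStrRec_eq _ hl]

theorem pvStep_str_short (d : pvState) (raw : String)
    (hc : ¬ PySem.Str.startswith (PySem.Str.strip raw) "CAS;" = true)
    (hn : ¬ PySem.Str.startswith (PySem.Str.strip raw) "NET;" = true)
    (hs : PySem.Str.startswith (PySem.Str.strip raw) "STR;" = true)
    (hl : ¬ ((PySem.Str.split? (PySem.Str.strip raw) ";").getD []).length ≥ 10) :
    pvStepA d raw = d := by
  unfold pvStepA pvStrA
  rw [if_neg hc, if_neg hn, if_pos hs, if_neg hl]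

theorem pvStep_none (d : pvState) (raw : String)
    (hc : ¬ PySem.Str.startswith (PySem.Str.strip raw) "CAS;" = true)
    (hn : ¬ PySem.Str.startswith (PySem.Str.strip raw) "NET;" = true)
    (hs : ¬ PySem.Str.startswith (PySem.Str.strip raw) "STR;" = true) :
    pvStepA d raw = d := by
  unfold pvStepA
  rw [if_neg hc, if_neg hn, if_neg hs]

-- the loop invariant: folding A's step from a generic 3-key state appends exactly
-- the three staged lists B computes
theorem pvMain (raws : List String) (c n s : List (List (String × String))) :
    ((raws.foldl pvStepA (PySem.Dict.mk [("casters", c), ("networks", n), ("streams", s)])).items)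
    = [("casters", c ++ (pvPaddedParts (raws.map PySem.Str.strip) "CAS;" 3).map pvCasRec),
       ("networks", n ++ (pvPaddedParts (raws.map PySem.Str.strip) "NET;" 2).map pvNetRec),
       ("streams", s ++ (pvPaddedParts (raws.map PySem.Str.strip) "STR;" 10).map pvStrRec)] := by
  induction raws generalizing c n s with
  | nil =>
    simp only [List.foldl_nil, List.map_nil, pvPaddedParts, List.filterMap_nil, List.append_nil]
  | cons raw rest ih =>
    simp only [List.foldl_cons, List.map_cons]
    by_cases hc : PySem.Str.startswith (PySem.Str.strip raw) "CAS;" = true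
    · rw [pvPaddedParts_neg _ _ _ _ (pvExclCN _ hc), pvPaddedParts_neg _ _ _ _ (pvExclCS _ hc)]
      by_cases hl : ((PySem.Str.split? (PySem.Str.strip raw) ";").getD []).length ≥ 3
      · rw [pvPaddedParts_pos _ _ _ _ hc hl, pvStep_cas c n s raw hc hl, ih]
        simp only [List.map_cons, List.append_assoc, List.singleton_append]
      · rw [pvPaddedParts_short _ _ _ _ hc hl, pvStep_cas_short _ raw hc hl, ih]
    · by_cases hn : PySem.Str.startswith (PySem.Str.strip raw) "NET;" = true
      · rw [pvPaddedParts_neg _ _ _ _ (pvExclNC _ hn), pvPaddedParts_neg _ _ _ _ (pvExclNS _ hn)]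
        by_cases hl : ((PySem.Str.split? (PySem.Str.strip raw) ";").getD []).length ≥ 2
        · rw [pvPaddedParts_pos _ _ _ _ hn hl, pvStep_net c n s raw hc hn hl, ih]
          simp only [List.map_cons, List.append_assoc, List.singleton_append]
        · rw [pvPaddedParts_short _ _ _ _ hn hl, pvStep_net_short _ raw hc hn hl, ih]
      · by_cases hs : PySem.Str.startswith (PySem.Str.strip raw) "STR;" = true
        · rw [pvPaddedParts_neg _ _ _ _ (pvExclSC _ hs), pvPaddedParts_neg _ _ _ _ (pvExclSN _ hs)]
          by_cases hl : ((PySem.Str.split? (PySem.Str.strip raw) ";").getD []).length ≥ 10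
          · rw [pvPaddedParts_pos _ _ _ _ hs hl, pvStep_str c n s raw hc hn hs hl, ih]
            simp only [List.map_cons, List.append_assoc, List.singleton_append]
          · rw [pvPaddedParts_short _ _ _ _ hs hl, pvStep_str_short _ raw hc hn hs hl, ih]
        · rw [pvPaddedParts_neg _ _ _ _ (by simpa using hc), pvPaddedParts_neg _ _ _ _ (by simpa using hn),
            pvPaddedParts_neg _ _ _ _ (by simpa using hs), pvStep_none _ raw hc hn hs, ih]

-- ===== VERDICT =====
theorem parse_sourcetable_spec : Claim_equal_parse_sourcetable := by
  intro s _
  unfold Spec_parse_sourcetable parse_sourcetable parse_sourcetable_alt pvInit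
  rw [pvMain]
  simp only [List.nil_append]
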